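-- pv_equiv track=rewrite | github.com/ArteBang/Algorithm-Study | Templates/Base Converter.py | ter_to_dec
-- ===== SOURCE A (Python) =====
-- def ter_to_dec(n):
--     answer = 0
--     multiplier = 1  # (3^0)
--
--     while n > 0:
--         digit = n % 10
--         answer += digit * multiplier
--
--         n = n // 10
--         multiplier *= 3  # (1 -> 3 -> 9...)
--
--     return answer
-- ===== SOURCE B (Python) =====
-- def ter_to_dec(n):
--     if n <= 0:
--         return 0
--     answer = 0
--     for ch in str(n):
--         answer = answer * 3 + int(ch)
--     return answer
-- ===== Notes on version B (the rewrite author's own statement) =====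
-- stated objective: idiomatic
-- what changed: B converts n to its decimal string and applies Horner's rule left to right (most-significant digit first), eliminating A's right-to-left digit extraction loop with its running power-of-3 multiplier.
import Mathlib
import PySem

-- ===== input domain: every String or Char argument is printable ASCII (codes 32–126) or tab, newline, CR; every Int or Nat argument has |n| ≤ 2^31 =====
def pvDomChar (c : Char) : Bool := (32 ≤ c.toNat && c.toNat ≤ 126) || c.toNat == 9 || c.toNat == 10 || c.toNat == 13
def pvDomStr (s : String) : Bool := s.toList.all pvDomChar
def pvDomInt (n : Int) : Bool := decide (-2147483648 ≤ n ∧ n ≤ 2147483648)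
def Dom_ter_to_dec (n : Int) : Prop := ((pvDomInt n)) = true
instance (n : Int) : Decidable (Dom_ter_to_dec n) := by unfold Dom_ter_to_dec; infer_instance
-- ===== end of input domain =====

-- B replaces A's right-to-left digit loop (running power-of-3 multiplier) with
-- Horner's rule over str(n), most-significant digit first; same cost, more idiomatic.


-- ===== PORT A =====
-- the while loop of A, state (n, answer, multiplier)
def terToDecLoop (n answer multiplier : Int) : Int :=
  if h : n > 0 then
    terToDecLoop (PySem.Int.floordiv n 10) (answer + (PySem.Int.mod n 10) * multiplier)
      (multiplier * 3)
  else answer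
termination_by n.toNat
decreasing_by
  simp only [PySem.Int.floordiv, Int.fdiv_eq_ediv]
  omega

def ter_to_dec (n : Int) : Int := terToDecLoop n 0 1

-- ===== PORT B =====
-- for ch in str(n): answer = answer*3 + int(ch)
-- int(ch) is ported as the digit value c.toNat - 48; exact, since str(n) for n > 0
-- consists only of the decimal-digit characters '0'..'9'.
def ter_to_dec_alt (n : Int) : Int :=
  if n ≤ 0 then 0
  else (PySem.Int.toStr n).toList.foldl (fun a c => a * 3 + ((c.toNat : Int) - 48)) 0

-- ===== PRECONDITION & SPEC =====
def Spec_ter_to_dec (n : Int) (out : Int) : Prop := out = ter_to_dec_alt n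
instance (n : Int) (out : Int) : Decidable (Spec_ter_to_dec n out) := by unfold Spec_ter_to_dec; infer_instance

-- ===== CLAIM (what is proved, stated in full; the proofs are below) =====
def Claim_equal_ter_to_dec : Prop := ∀ (n : Int), Dom_ter_to_dec n → Spec_ter_to_dec n (ter_to_dec n)

-- ===== LEMMAS AND PROOFS =====

-- Horner value of the decimal digits of a natural number, starting from z
def hornerAux (z : Int) (n : Nat) : Int :=
  if h : n / 10 = 0 then z * 3 + (n % 10 : Nat)
  else hornerAux z (n / 10) * 3 + (n % 10 : Nat)
termination_by n
decreasing_by exact Nat.div_lt_self (by omega) (by omega)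

lemma hornerAux_zero_step (t : Nat) :
    hornerAux 0 t = hornerAux 0 (t / 10) * 3 + (t % 10 : Nat) := by
  rw [hornerAux]
  by_cases h : t / 10 = 0
  · simp [h, hornerAux]
  · simp [h]

lemma digitChar_val (d : Nat) (h : d < 10) :
    ((Nat.digitChar d).toNat : Int) - 48 = (d : Int) := by
  interval_cases d <;> decide

-- folding Horner's step over toDigitsCore
lemma foldl_toDigitsCore (f : Nat) :
    ∀ (n : Nat) (acc : List Char) (z : Int), n < 10 ^ (f + 1) →
      (Nat.toDigitsCore 10 (f + 1) n acc).foldl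
          (fun a c => a * 3 + ((c.toNat : Int) - 48)) z
        = acc.foldl (fun a c => a * 3 + ((c.toNat : Int) - 48)) (hornerAux z n) := by
  induction f with
  | zero =>
    intro n acc z hn
    have h10 : n / 10 = 0 := Nat.div_eq_of_lt (by simpa using hn)
    rw [Nat.toDigitsCore, if_pos h10, List.foldl_cons, hornerAux]
    simp [h10, digitChar_val (n % 10) (Nat.mod_lt _ (by omega))]
  | succ f ih =>
    intro n acc z hn
    by_cases h10 : n / 10 = 0
    · rw [Nat.toDigitsCore, if_pos h10, List.foldl_cons, hornerAux]
      simp [h10, digitChar_val (n % 10) (Nat.mod_lt _ (by omega))]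
    · have hlt : n / 10 < 10 ^ (f + 1) := by
        have : n < 10 ^ (f + 1) * 10 := by
          calc n < 10 ^ (f + 1 + 1) := hn
          _ = 10 ^ (f + 1) * 10 := by ring
        omega
      rw [Nat.toDigitsCore, if_neg h10]
      rw [ih (n / 10) _ z hlt, List.foldl_cons]
      congr 1
      show hornerAux z (n / 10) * 3 + (((n % 10).digitChar.toNat : Int) - 48)
        = hornerAux z n
      rw [digitChar_val (n % 10) (Nat.mod_lt _ (by omega))]
      conv_rhs => rw [hornerAux]
      rw [dif_neg h10]

lemma foldl_toDigits (m : Nat) :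
    (Nat.toDigits 10 m).foldl (fun a c => a * 3 + ((c.toNat : Int) - 48)) 0
      = hornerAux 0 m := by
  have hm : m < 10 ^ (m + 1) := by
    calc m < 10 ^ m := Nat.lt_pow_self (by omega)
    _ ≤ 10 ^ (m + 1) := Nat.pow_le_pow_right (by omega) (by omega)
  simpa using foldl_toDigitsCore m m [] 0 hm

-- A's loop invariant: it accumulates answer + multiplier · Horner(digits of n)
lemma terToDecLoop_eq (n answer multiplier : Int) (hn : 0 ≤ n) :
    terToDecLoop n answer multiplier = answer + multiplier * hornerAux 0 n.toNat := by
  by_cases h : n > 0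
  · rw [terToDecLoop.eq_def]
    simp only [h, dif_pos]
    have hfd : PySem.Int.floordiv n 10 = (n.toNat / 10 : Nat) := by
      simp only [PySem.Int.floordiv, Int.fdiv_eq_ediv]
      omega
    have hmd : PySem.Int.mod n 10 = (n.toNat % 10 : Nat) := by
      simp only [PySem.Int.mod, Int.fmod_eq_emod]
      omega
    have hge : (0 : Int) ≤ PySem.Int.floordiv n 10 := by rw [hfd]; positivity
    rw [terToDecLoop_eq _ _ _ hge, hfd, hmd]
    have ht : ((n.toNat / 10 : Nat) : Int).toNat = n.toNat / 10 := by omega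
    rw [ht, hornerAux_zero_step n.toNat]
    ring
  · rw [terToDecLoop.eq_def]
    simp only [h, dif_neg, not_false_iff]
    have : n = 0 := by omega
    subst this
    rw [hornerAux]
    norm_num
termination_by n.toNat
decreasing_by
  simp only [PySem.Int.floordiv, Int.fdiv_eq_ediv]
  omega

-- ===== VERDICT (by name: the statement is the Claim_ definition above) =====
theorem ter_to_dec_spec : Claim_equal_ter_to_dec := by
  intro n _
  unfold Spec_ter_to_dec ter_to_dec ter_to_dec_alt
  by_cases h : n ≤ 0
  · rw [terToDecLoop.eq_def]
    simp [h]
  · have hpos : (0:Int) < n := by omega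
    rw [terToDecLoop_eq n 0 1 (le_of_lt hpos)]
    rw [if_neg h, PySem.Int.toList_toStr]
    simp only [PySem.Int.toChars, if_neg (by omega : ¬ n < 0)]
    rw [foldl_toDigits]
    ring
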